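-- pv_equiv track=rewrite | github.com/RogerMo01/DAA-Problems | balanced_suffixes/naive.py | is_good_strings
-- ===== SOURCE A (Python) =====
-- def is_good_strings(string: str, char_combinations_list: list[tuple[str, str]], k: int):
--     frequency_suffix = {}
--
--     for i in range(len(string) - 1, -1, -1):
--         char = string[i]
--         if char in frequency_suffix:
--             frequency_suffix[char] += 1
--         else:
--             frequency_suffix[char] = 1
--
--         for item in char_combinations_list:
--             x = item[0]
--             y = item[1]
--             if x in frequency_suffix:
--                 if y in frequency_suffix:
--                     if abs(frequency_suffix[x] - frequency_suffix[y]) > k: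
--                         return False
--                 else:
--                     if frequency_suffix[x] > k:
--                         return False
--             else:
--                 if y in frequency_suffix:
--                     if frequency_suffix[y] > k:
--                         return False
--
--     return True
-- ===== SOURCE B (Python) =====
-- def is_good_strings(string, char_combinations_list, k):
--     # Pair-major: for each distinct pair, stream the string once from the end
--     # with two counters; no frequency dict.
--     for x, y in set(char_combinations_list):
--         cx = 0
--         cy = 0
--         for ch in reversed(string):
--             if ch == x:
--                 cx += 1
--             if ch == y:
--                 cy += 1
--             if cx and cy:
--                 if abs(cx - cy) > k:
--                     return False
--             elif cx:
--                 if cx > k: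
--                     return False
--             elif cy:
--                 if cy > k:
--                     return False
--     return True
-- ===== Notes on version B (the rewrite author's own statement) =====
-- stated objective: alternative
-- what changed: Replaced A's position-major scan (one pass over suffixes, re-checking every pair against a shared frequency dict at every position) by a pair-major check: for each distinct pair, one reverse scan of the string with two plain counters and no dict; duplicate pairs are checked once via set().
import Mathlib
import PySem

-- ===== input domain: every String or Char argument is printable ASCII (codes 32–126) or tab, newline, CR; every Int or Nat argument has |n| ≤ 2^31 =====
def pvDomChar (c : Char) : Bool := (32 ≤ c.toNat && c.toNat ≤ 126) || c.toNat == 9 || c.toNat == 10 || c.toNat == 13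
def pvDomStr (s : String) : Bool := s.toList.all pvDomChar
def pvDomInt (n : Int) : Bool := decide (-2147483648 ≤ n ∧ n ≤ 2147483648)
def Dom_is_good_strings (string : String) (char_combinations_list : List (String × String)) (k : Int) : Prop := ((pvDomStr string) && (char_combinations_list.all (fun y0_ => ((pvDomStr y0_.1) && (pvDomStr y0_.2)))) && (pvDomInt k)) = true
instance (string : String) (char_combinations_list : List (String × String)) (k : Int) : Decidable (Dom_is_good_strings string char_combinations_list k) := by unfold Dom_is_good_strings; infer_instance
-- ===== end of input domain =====

-- B re-implements the check pair-major (one reverse scan with two counters per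
-- distinct pair, no frequency dict) instead of A's position-major scan that
-- re-checks every pair at every suffix; same Boolean result (objective: alternative).

-- ===== PORT A =====
-- inner 'for item in char_combinations_list' loop with its early returns
def pvCheckPairsA (freq : PySem.Dict String Int) (k : Int) : List (String × String) → Bool
  | [] => true
  | item :: rest =>
    let x := item.1
    let y := item.2
    if freq.contains x then
      if freq.contains y then
        if |freq.getD x 0 - freq.getD y 0| > k then false else pvCheckPairsA freq k rest
      else
        if freq.getD x 0 > k then false else pvCheckPairsA freq k rest
    else
      if freq.contains y then
        if freq.getD y 0 > k then false else pvCheckPairsA freq k rest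
      else pvCheckPairsA freq k rest

-- outer 'for i in range(len(string)-1,-1,-1)' loop: the characters in reverse order
def pvLoopA (ccl : List (String × String)) (k : Int) : List Char → PySem.Dict String Int → Bool
  | [], _ => true
  | c :: rest, freq =>
    let ch := String.singleton c
    let freq' := if freq.contains ch then freq.insert ch (freq.getD ch 0 + 1) else freq.insert ch 1
    if pvCheckPairsA freq' k ccl then pvLoopA ccl k rest freq' else false

def is_good_strings (string : String) (char_combinations_list : List (String × String)) (k : Int) : Bool :=
  pvLoopA char_combinations_list k string.toList.reverse PySem.Dict.empty

-- ===== PORT B =====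
-- inner 'for ch in reversed(string)' scan with the two counters cx, cy
def pvScanB (k : Int) (x y : String) : List Char → Int → Int → Bool
  | [], _, _ => true
  | c :: rest, cx, cy =>
    let cx' := if String.singleton c == x then cx + 1 else cx
    let cy' := if String.singleton c == y then cy + 1 else cy
    if cx' ≠ 0 then
      if cy' ≠ 0 then
        if |cx' - cy'| > k then false else pvScanB k x y rest cx' cy'
      else
        if cx' > k then false else pvScanB k x y rest cx' cy'
    else
      if cy' ≠ 0 then
        if cy' > k then false else pvScanB k x y rest cx' cy'
      else pvScanB k x y rest cx' cy'

-- outer 'for x, y in set(char_combinations_list)' loop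
def pvPairsB (rs : List Char) (k : Int) : List (String × String) → Bool
  | [] => true
  | (x, y) :: rest => if pvScanB k x y rs 0 0 then pvPairsB rs k rest else false

def is_good_strings_alt (string : String) (char_combinations_list : List (String × String)) (k : Int) : Bool :=
  pvPairsB string.toList.reverse k (PySem.Set.ofList char_combinations_list)

-- ===== PRECONDITION & SPEC =====
def Spec_is_good_strings (string : String) (char_combinations_list : List (String × String)) (k : Int) (out : Bool) : Prop := out = is_good_strings_alt string char_combinations_list k
instance (string : String) (char_combinations_list : List (String × String)) (k : Int) (out : Bool) : Decidable (Spec_is_good_strings string char_combinations_list k out) := by unfold Spec_is_good_strings; infer_instance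

-- ===== CLAIM (what is proved, stated in full; the proofs are below) =====
def Claim_equal_is_good_strings : Prop := ∀ (string : String) (char_combinations_list : List (String × String)) (k : Int), Dom_is_good_strings string char_combinations_list k → Spec_is_good_strings string char_combinations_list k (is_good_strings string char_combinations_list k)

-- ===== LEMMAS AND PROOFS =====

-- number of occurrences of key x among the characters of p
def pvCnt (x : String) (p : List Char) : Int := (p.countP (fun c => String.singleton c == x) : Int)

-- contribution of one character c to the count of key x
def pvInd (x : String) (c : Char) : Int := if String.singleton c == x then 1 else 0

-- the violation test both programs apply, on raw counts
def pvViolC (k cx cy : Int) : Bool :=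
  if cx ≠ 0 then
    if cy ≠ 0 then decide (|cx - cy| > k) else decide (cx > k)
  else
    if cy ≠ 0 then decide (cy > k) else false

-- common specification: no violation for (x,y) at any nonempty prefix of rs (counts offset by bx, by_)
def pvOK (k : Int) (x y : String) (bx by_ : Int) (rs : List Char) : Prop :=
  ∀ n : Nat, 0 < n → n ≤ rs.length → pvViolC k (bx + pvCnt x (rs.take n)) (by_ + pvCnt y (rs.take n)) = false

theorem pvInd_nonneg (x : String) (c : Char) : (0 : Int) ≤ pvInd x c := by
  unfold pvInd; split_ifs <;> norm_num

theorem pvCnt_single (x : String) (c : Char) : pvCnt x [c] = pvInd x c := by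
  by_cases h : (String.singleton c == x) = true <;> simp [pvCnt, pvInd, h]

theorem pvCnt_cons (x : String) (c : Char) (p : List Char) :
    pvCnt x (c :: p) = pvInd x c + pvCnt x p := by
  by_cases h : (String.singleton c == x) = true <;>
    simp [pvCnt, pvInd, h, add_comm]

theorem pvScanB_cons (k : Int) (x y : String) (c : Char) (rest : List Char) (cx cy : Int) :
    pvScanB k x y (c :: rest) cx cy =
      if pvViolC k (cx + pvInd x c) (cy + pvInd y c)
      then false
      else pvScanB k x y rest (cx + pvInd x c) (cy + pvInd y c) := by
  have hx : (if String.singleton c == x then cx + 1 else cx) = cx + pvInd x c := by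
    unfold pvInd; split_ifs <;> simp
  have hy : (if String.singleton c == y then cy + 1 else cy) = cy + pvInd y c := by
    unfold pvInd; split_ifs <;> simp
  simp only [pvScanB, hx, hy, pvViolC]
  by_cases h1 : cx + pvInd x c ≠ 0 <;> by_cases h2 : cy + pvInd y c ≠ 0 <;>
    simp [h1, h2]

theorem pvOK_cons (k : Int) (x y : String) (bx by_ : Int) (c : Char) (rest : List Char) :
    pvOK k x y bx by_ (c :: rest) ↔
      (pvViolC k (bx + pvInd x c) (by_ + pvInd y c) = false ∧
       pvOK k x y (bx + pvInd x c) (by_ + pvInd y c) rest) := by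
  constructor
  · intro h
    refine ⟨by simpa [pvCnt_single] using h 1 (by omega) (by simp), ?_⟩
    intro n hn hle
    have := h (n + 1) (by omega) (by simp; omega)
    simpa [List.take_succ_cons, pvCnt_cons, add_assoc] using this
  · rintro ⟨h1, h⟩ n hn hle
    match n with
    | 1 => simpa [pvCnt_single] using h1
    | n + 2 =>
      have := h (n + 1) (by omega) (by simp at hle ⊢; omega)
      simpa [List.take_succ_cons, pvCnt_cons, add_assoc] using this

theorem pvScanB_iff (k : Int) (x y : String) :
    ∀ (rs : List Char) (cx cy : Int), pvScanB k x y rs cx cy = true ↔ pvOK k x y cx cy rs := by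
  intro rs
  induction rs with
  | nil =>
    intro cx cy
    constructor
    · intro _ n hn hle; simp at hle; omega
    · intro _; rfl
  | cons c rest ih =>
    intro cx cy
    rw [pvScanB_cons, pvOK_cons]
    by_cases hv : pvViolC k (cx + pvInd x c) (cy + pvInd y c) = true
    · simp [hv]
    · simp only [Bool.not_eq_true] at hv
      simp [hv, ih]

-- freq represents the nonnegative count function g
def pvRep (freq : PySem.Dict String Int) (g : String → Int) : Prop :=
  (∀ s, freq.get? s = if g s = 0 then none else some (g s)) ∧ (∀ s, 0 ≤ g s)

theorem pvRep_contains {freq : PySem.Dict String Int} {g : String → Int} (h : pvRep freq g) (s : String) :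
    freq.contains s = decide (g s ≠ 0) := by
  rw [PySem.Dict.contains_eq_isSome_get?, h.1 s]
  split_ifs with hs <;> simp [hs]

theorem pvRep_getD {freq : PySem.Dict String Int} {g : String → Int} (h : pvRep freq g) (s : String) :
    freq.getD s 0 = g s := by
  rw [PySem.Dict.getD_eq_get?_getD, h.1 s]
  split_ifs with hs <;> simp [hs]

theorem pvCheckPairsA_cons {freq : PySem.Dict String Int} {g : String → Int} (h : pvRep freq g)
    (k : Int) (x y : String) (rest : List (String × String)) :
    pvCheckPairsA freq k ((x, y) :: rest) =
      if pvViolC k (g x) (g y) then false else pvCheckPairsA freq k rest := by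
  simp only [pvCheckPairsA, pvRep_contains h, pvRep_getD h, pvViolC]
  by_cases hx : g x ≠ 0 <;> by_cases hy : g y ≠ 0 <;> simp [hx, hy]

theorem pvCheckPairsA_iff {freq : PySem.Dict String Int} {g : String → Int} (h : pvRep freq g) (k : Int) :
    ∀ ps : List (String × String),
      pvCheckPairsA freq k ps = true ↔ ∀ it ∈ ps, pvViolC k (g it.1) (g it.2) = false := by
  intro ps
  induction ps with
  | nil => simp [pvCheckPairsA]
  | cons it rest ih =>
    obtain ⟨x, y⟩ := it
    rw [pvCheckPairsA_cons h, List.forall_mem_cons]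
    by_cases hv : pvViolC k (g x) (g y) = true
    · simp [hv]
    · simp only [Bool.not_eq_true] at hv
      simp [hv, ih]

theorem pvRep_step {freq : PySem.Dict String Int} {g : String → Int} (h : pvRep freq g) (c : Char) :
    (if freq.contains (String.singleton c) then
        freq.insert (String.singleton c) (freq.getD (String.singleton c) 0 + 1)
      else freq.insert (String.singleton c) 1) =
      freq.insert (String.singleton c) (g (String.singleton c) + 1) := by
  rw [pvRep_contains h, pvRep_getD h]
  split_ifs with hc
  · rfl
  · simp only [decide_eq_true_eq, Decidable.not_not] at hc
    rw [hc]
    norm_num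

theorem pvRep_insert {freq : PySem.Dict String Int} {g : String → Int} (h : pvRep freq g) (c : Char) :
    pvRep (freq.insert (String.singleton c) (g (String.singleton c) + 1))
      (fun s => g s + pvInd s c) := by
  constructor
  · intro s
    show (freq.insert (String.singleton c) (g (String.singleton c) + 1)).get? s
        = if g s + pvInd s c = 0 then none else some (g s + pvInd s c)
    rw [PySem.Dict.get?_insert]
    by_cases hs : s = String.singleton c
    · have h2 := h.2 (String.singleton c)
      have hind : pvInd s c = 1 := by rw [hs]; simp [pvInd]
      rw [if_pos hs, hind, hs, if_neg (by omega)]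
    · have hind : pvInd s c = 0 := by simp [pvInd, Ne.symm hs]
      rw [if_neg hs, hind, add_zero, h.1 s]
  · intro s
    show (0 : Int) ≤ g s + pvInd s c
    have h1 := h.2 s
    have h2 := pvInd_nonneg s c
    omega

theorem pvLoopA_iff (ccl : List (String × String)) (k : Int) :
    ∀ (rs : List Char) (freq : PySem.Dict String Int) (g : String → Int), pvRep freq g →
      (pvLoopA ccl k rs freq = true ↔
        ∀ it ∈ ccl, pvOK k it.1 it.2 (g it.1) (g it.2) rs) := by
  intro rs
  induction rs with
  | nil =>
    intro freq g h
    constructor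
    · intro _ it _ n hn hle; simp at hle; omega
    · intro _; rfl
  | cons c rest ih =>
    intro freq g h
    have hrep : pvRep (freq.insert (String.singleton c) (g (String.singleton c) + 1))
        (fun s => g s + pvInd s c) := pvRep_insert h c
    simp only [pvLoopA, pvRep_step h c]
    by_cases hcp : pvCheckPairsA (freq.insert (String.singleton c) (g (String.singleton c) + 1)) k ccl = true
    · rw [if_pos hcp, ih _ _ hrep]
      constructor
      · intro hl it hit
        rw [pvOK_cons]
        exact ⟨(pvCheckPairsA_iff hrep k ccl).mp hcp it hit, hl it hit⟩
      · intro hall it hit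
        exact ((pvOK_cons k it.1 it.2 (g it.1) (g it.2) c rest).mp (hall it hit)).2
    · rw [if_neg hcp]
      constructor
      · intro hfalse; exact absurd hfalse (by simp)
      · intro hall
        exact absurd ((pvCheckPairsA_iff hrep k ccl).mpr
          (fun it hit => ((pvOK_cons k it.1 it.2 (g it.1) (g it.2) c rest).mp (hall it hit)).1)) hcp

theorem pvPairsB_iff (rs : List Char) (k : Int) :
    ∀ ps : List (String × String),
      pvPairsB rs k ps = true ↔ ∀ it ∈ ps, pvScanB k it.1 it.2 rs 0 0 = true := by
  intro ps
  induction ps with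
  | nil => simp [pvPairsB]
  | cons it rest ih =>
    obtain ⟨x, y⟩ := it
    simp only [pvPairsB, List.forall_mem_cons]
    split_ifs with hs <;> simp_all

theorem pvRep_empty : pvRep PySem.Dict.empty (fun _ => 0) := by
  constructor
  · intro s; simp [PySem.Dict.get?_empty]
  · intro s; norm_num

-- ===== VERDICT (by name: the statement is the Claim_ definition above) =====
theorem is_good_strings_spec : Claim_equal_is_good_strings := by
  intro string ccl k _
  unfold Spec_is_good_strings is_good_strings is_good_strings_alt
  have hA := pvLoopA_iff ccl k string.toList.reverse PySem.Dict.empty (fun _ => 0) pvRep_empty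
  have hB := pvPairsB_iff string.toList.reverse k (PySem.Set.ofList ccl)
  have hmem : ∀ it : String × String, it ∈ PySem.Set.ofList ccl ↔ it ∈ ccl := by
    intro it; simp [PySem.Set.mem_ofList]
  have key : (pvLoopA ccl k string.toList.reverse PySem.Dict.empty = true) ↔
      (pvPairsB string.toList.reverse k (PySem.Set.ofList ccl) = true) := by
    rw [hA, hB]
    constructor
    · intro h it hit
      rw [pvScanB_iff]
      simpa using h it ((hmem it).mp hit)
    · intro h it hit
      have := (pvScanB_iff k it.1 it.2 string.toList.reverse 0 0).mp (h it ((hmem it).mpr hit))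
      simpa using this
  cases hA' : pvLoopA ccl k string.toList.reverse PySem.Dict.empty <;>
    cases hB' : pvPairsB string.toList.reverse k (PySem.Set.ofList ccl) <;> simp_all
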